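-- pv_equiv track=rewrite | github.com/cosc-1336-fall-2024/course-elijahnacc | src/homework/h_strings/strings.py | valid_strand
-- ===== SOURCE A (Python) =====
-- def valid_strand(strand):
--
--     options = ("A", "C", "G", "T")
--     invalid_options = 0
--
--     for i in range(len(strand)):
--         if strand[i] not in options:
--             invalid_options += 1
--
--     if invalid_options == 0:
--         return True
--     else:
--         return False
-- ===== SOURCE B (Python) =====
-- def valid_strand(strand):
--     return strand.replace("A", "").replace("C", "").replace("G", "").replace("T", "") == ""
-- ===== Notes on version B (the rewrite author's own statement) =====
-- stated objective: faster
-- what changed: Replaces the per-index loop with an invalid-character counter by four whole-string delete passes (replace each valid base with the empty string) followed by an emptiness test; no explicit loop or counter remains.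
import Mathlib
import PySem

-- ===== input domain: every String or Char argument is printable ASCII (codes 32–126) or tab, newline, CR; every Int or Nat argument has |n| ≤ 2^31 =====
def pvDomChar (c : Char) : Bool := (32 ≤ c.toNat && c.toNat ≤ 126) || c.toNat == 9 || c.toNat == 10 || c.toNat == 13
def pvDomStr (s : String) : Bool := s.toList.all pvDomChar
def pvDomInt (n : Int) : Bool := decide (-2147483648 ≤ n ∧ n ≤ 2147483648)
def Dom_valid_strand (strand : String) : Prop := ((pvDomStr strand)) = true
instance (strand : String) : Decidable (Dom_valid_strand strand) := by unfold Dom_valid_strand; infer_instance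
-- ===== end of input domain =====

-- B replaces A's index loop with an invalid-character counter by four whole-string
-- delete passes (replace each valid base by "") followed by an emptiness test.

-- ===== PORT A =====
-- counts characters not in ("A","C","G","T") by index, then compares the count with 0
def valid_strand (strand : String) : Bool :=
  let options : List Char := ['A', 'C', 'G', 'T']
  let invalid_options : Int :=
    (PySem.List.pyRange 0 (PySem.Str.len strand) 1).foldl
      (fun acc i =>
        if ¬ ((PySem.Str.pyGet? strand i).any (fun c => options.contains c)) then acc + 1 else acc)
      0
  if invalid_options = 0 then true else false

-- ===== PORT B =====
-- strand.replace("A","").replace("C","").replace("G","").replace("T","") == ""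
def valid_strand_alt (strand : String) : Bool :=
  PySem.Str.replace (PySem.Str.replace (PySem.Str.replace (PySem.Str.replace
    strand "A" "") "C" "") "G" "") "T" "" == ""

-- ===== PRECONDITION & SPEC =====
def Spec_valid_strand (strand : String) (out : Bool) : Prop := out = valid_strand_alt strand
instance (strand : String) (out : Bool) : Decidable (Spec_valid_strand strand out) := by unfold Spec_valid_strand; infer_instance

-- ===== CLAIM (what is proved, stated in full; the proofs are below) =====
def Claim_equal_valid_strand : Prop := ∀ (strand : String), Dom_valid_strand strand → Spec_valid_strand strand (valid_strand strand)

-- ===== LEMMAS AND PROOFS =====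

theorem foldl_count_ite (xs : List Int) (p : Int → Prop) [DecidablePred p] (acc : Int) :
    xs.foldl (fun a i => if p i then a + 1 else a) acc = acc + xs.countP (fun i => decide (p i)) := by
  induction xs generalizing acc with
  | nil => simp
  | cons x xs ih =>
    simp only [List.foldl_cons, List.countP_cons, ih]
    by_cases h : p x
    · simp only [h, if_pos, decide_true]
      push_cast
      ring
    · simp [h]

theorem valid_strand_eq_all (strand : String) :
    valid_strand strand = strand.toList.all (fun c => c ∈ (['A','C','G','T'] : List Char)) := by
  rw [Bool.eq_iff_iff]
  unfold valid_strand
  simp only [foldl_count_ite, Int.zero_add, List.all_eq_true]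
  split_ifs with h0
  · simp only [true_iff]
    rw [Nat.cast_eq_zero, List.countP_eq_zero] at h0
    intro c hc
    obtain ⟨n, hn, rfl⟩ := List.mem_iff_getElem.mp hc
    have hmem : (n : Int) ∈ PySem.List.pyRange 0 (PySem.Str.len strand) 1 := by
      rw [PySem.List.mem_pyRange_one, PySem.Str.len_eq]
      constructor
      · exact Int.natCast_nonneg n
      · exact_mod_cast hn
    have := h0 _ hmem
    simp only [decide_eq_true_eq, not_not, PySem.Str.pyGet?_natCast,
      List.getElem?_eq_getElem hn, Option.any_some] at this
    simpa using this
  · simp only [false_iff, not_forall]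
    rw [Nat.cast_eq_zero] at h0
    have h1 : ¬ ∀ i ∈ PySem.List.pyRange 0 (PySem.Str.len strand) 1,
        ¬ (decide ¬((PySem.Str.pyGet? strand i).any
            (fun c => (['A','C','G','T'] : List Char).contains c)) = true) := by
      intro h
      exact h0 (List.countP_eq_zero.mpr h)
    push Not at h1
    obtain ⟨i, hi, hpi⟩ := h1
    rw [PySem.List.mem_pyRange_one, PySem.Str.len_eq] at hi
    obtain ⟨h1, h2⟩ := hi
    have hlt : i.toNat < strand.toList.length := by omega
    refine ⟨strand.toList[i.toNat], List.getElem_mem hlt, ?_⟩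
    have : PySem.Str.pyGet? strand i = some strand.toList[i.toNat] := by
      conv_lhs => rw [show i = ((i.toNat : Nat) : Int) by omega]
      rw [PySem.Str.pyGet?_natCast, List.getElem?_eq_getElem hlt]
    simp only [decide_eq_true_eq] at hpi
    rw [this] at hpi
    simpa using hpi

-- replace.go with a single-char pattern and empty replacement is a filter
theorem replace_go_singleton (a : Char) (fuel : Nat) (l acc : List Char) (h : l.length ≤ fuel) :
    PySem.Chars.replace.go [a] [] fuel l acc = acc.reverse ++ l.filter (fun c => c != a) := by
  induction fuel generalizing l acc with
  | zero =>
    have : l = [] := List.length_eq_zero_iff.mp (Nat.le_zero.mp h)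
    subst this
    simp [PySem.Chars.replace.go]
  | succ n ih =>
    cases l with
    | nil => simp [PySem.Chars.replace.go]
    | cons c t =>
      rw [PySem.Chars.replace.go]
      by_cases hc : c = a
      · subst hc
        have hp : List.isPrefixOf [c] (c :: t) = true := by simp [List.isPrefixOf]
        simp only [hp, if_pos]
        rw [ih _ _ (by simpa using Nat.le_of_succ_le_succ h)]
        simp
      · have hp : List.isPrefixOf [a] (c :: t) = false := by
          simp [List.isPrefixOf, Ne.symm hc]
        simp only [hp, Bool.false_eq_true, if_neg, not_false_iff]
        rw [ih _ _ (by simpa using Nat.le_of_succ_le_succ h)]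
        simp [hc]

theorem replace_singleton (a : Char) (cs : List Char) :
    PySem.Chars.replace cs [a] [] = cs.filter (fun c => c != a) := by
  rw [PySem.Chars.replace]
  simp only [List.isEmpty_cons, Bool.false_eq_true, if_neg, not_false_iff]
  exact replace_go_singleton a cs.length cs [] le_rfl

theorem valid_strand_alt_eq_all (strand : String) :
    valid_strand_alt strand = strand.toList.all (fun c => c ∈ (['A','C','G','T'] : List Char)) := by
  unfold valid_strand_alt
  rw [Bool.eq_iff_iff, beq_iff_eq, ← String.toList_inj]
  simp only [PySem.Str.toList_replace, String.toList_empty]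
  rw [show "A".toList = ['A'] from rfl, show "C".toList = ['C'] from rfl,
    show "G".toList = ['G'] from rfl, show "T".toList = ['T'] from rfl]
  simp only [replace_singleton, List.filter_filter]
  rw [List.filter_eq_nil_iff, List.all_eq_true]
  constructor
  · intro h c hc
    by_contra hmem
    exact h c hc (by simp at hmem ⊢; tauto)
  · intro h c hc hb
    have := h c hc
    simp at this hb
    tauto

-- ===== VERDICT (by name: the statement is the Claim_ definition above) =====
theorem valid_strand_spec : Claim_equal_valid_strand := by
  intro strand _
  unfold Spec_valid_strand
  rw [valid_strand_eq_all, valid_strand_alt_eq_all]
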